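-- pv_equiv track=rewrite | github.com/RomanBleyer/flask_art_website_development_code | setup_categorized_db.py | get_date_category
-- ===== SOURCE A (Python) =====
-- def get_date_category(date_missing):
--     """Determine date category based on date missing."""
--     if any(year in date_missing for year in ['1900', '1901', '1902', '1903', '1904', '1905', '1906', '1907', '1908', '1909',
--                                            '1910', '1911', '1912', '1913', '1914', '1915', '1916', '1917', '1918', '1919',
--                                            '1920', '1921', '1922', '1923', '1924', '1925', '1926', '1927', '1928', '1929',
--                                            '1930', '1931', '1932', '1933', '1934', '1935', '1936', '1937', '1938', '1939',
--                                            '1940', '1941', '1942', '1943', '1944', '1945', '1946', '1947', '1948', '1949']):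
--         return '1900 to 1950'
--     elif any(year in date_missing for year in ['1950', '1951', '1952', '1953', '1954', '1955', '1956', '1957', '1958', '1959',
--                                              '1960', '1961', '1962', '1963', '1964', '1965', '1966', '1967', '1968', '1969']):
--         return '1950 to 1970'
--     elif any(year in date_missing for year in ['1970', '1971', '1972', '1973', '1974', '1975', '1976', '1977', '1978', '1979',
--                                              '1980', '1981', '1982', '1983', '1984', '1985', '1986', '1987', '1988', '1989']):
--         return '1970 to 1990'
--     else:
--         return '1990 to present'
-- ===== SOURCE B (Python) =====
-- def get_date_category(date_missing):
--     """Determine date category based on date missing."""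
--     # single pass over 4-char windows, tracking the highest-priority (lowest) category seen
--     best = 3
--     for i in range(len(date_missing) - 3):
--         w = date_missing[i:i+4]
--         if w[0] == '1' and w[1] == '9' and w[2].isdigit() and w[3].isdigit():
--             if w[2] <= '4':
--                 cat = 0
--             elif w[2] <= '6':
--                 cat = 1
--             elif w[2] <= '8':
--                 cat = 2
--             else:
--                 cat = 3
--             if cat < best:
--                 best = cat
--     if best == 0:
--         return '1900 to 1950'
--     elif best == 1:
--         return '1950 to 1970'
--     elif best == 2:
--         return '1970 to 1990'
--     else:
--         return '1990 to present'
-- ===== Notes on version B (the rewrite author's own statement) =====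
-- stated objective: alternative
-- what changed: Instead of three any() chains running up to 90 separate substring searches (one per year string), B makes a single pass over the 4-character windows of the input, classifying each window by its characters ('19' prefix + third digit) and tracking the best (highest-priority) category seen.
import Mathlib
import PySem

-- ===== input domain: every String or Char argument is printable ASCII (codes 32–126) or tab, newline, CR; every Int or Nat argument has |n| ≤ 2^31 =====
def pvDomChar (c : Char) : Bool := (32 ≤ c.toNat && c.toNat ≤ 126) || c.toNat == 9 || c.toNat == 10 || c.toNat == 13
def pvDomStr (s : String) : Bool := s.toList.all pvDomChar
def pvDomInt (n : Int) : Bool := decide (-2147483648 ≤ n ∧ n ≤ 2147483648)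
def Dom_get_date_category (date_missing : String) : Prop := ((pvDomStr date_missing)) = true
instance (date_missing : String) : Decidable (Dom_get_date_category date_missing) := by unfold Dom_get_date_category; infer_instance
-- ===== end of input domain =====

-- B replaces A's three chains of up-to-90 substring searches by ONE pass over the
-- 4-character windows of the input, classifying each window by its characters.

-- ===== PORT A =====
def pvYears0 : List String :=
  ["1900", "1901", "1902", "1903", "1904", "1905", "1906", "1907", "1908", "1909", "1910", "1911", "1912", "1913", "1914", "1915", "1916", "1917", "1918", "1919", "1920", "1921", "1922", "1923", "1924", "1925", "1926", "1927", "1928", "1929", "1930", "1931", "1932", "1933", "1934", "1935", "1936", "1937", "1938", "1939", "1940", "1941", "1942", "1943", "1944", "1945", "1946", "1947", "1948", "1949"]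
def pvYears1 : List String :=
  ["1950", "1951", "1952", "1953", "1954", "1955", "1956", "1957", "1958", "1959", "1960", "1961", "1962", "1963", "1964", "1965", "1966", "1967", "1968", "1969"]
def pvYears2 : List String :=
  ["1970", "1971", "1972", "1973", "1974", "1975", "1976", "1977", "1978", "1979", "1980", "1981", "1982", "1983", "1984", "1985", "1986", "1987", "1988", "1989"]

def get_date_category (date_missing : String) : String :=
  if pvYears0.any (fun year => PySem.Str.isIn year date_missing) then "1900 to 1950"
  else if pvYears1.any (fun year => PySem.Str.isIn year date_missing) then "1950 to 1970"
  else if pvYears2.any (fun year => PySem.Str.isIn year date_missing) then "1970 to 1990"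
  else "1990 to present"

-- ===== PORT B =====
-- loop body of Source B: update `best` from the window `w` (the indices 0..3 are always
-- in range because every window produced by the loop has exactly 4 characters)
def pvStep (best : Nat) (w : List Char) : Nat :=
  if (PySem.Chars.pyGet? w 0 == some '1') && (PySem.Chars.pyGet? w 1 == some '9')
      && ((PySem.Chars.pyGet? w 2).map PySem.Chars.isdigit == some true)
      && ((PySem.Chars.pyGet? w 3).map PySem.Chars.isdigit == some true) then
    let t := (PySem.Chars.pyGet? w 2).getD ' '
    let cat : Nat := if t ≤ '4' then 0 else if t ≤ '6' then 1 else if t ≤ '8' then 2 else 3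
    if cat < best then cat else best
  else best

def get_date_category_alt (date_missing : String) : String :=
  let cs := date_missing.toList
  let best := (PySem.List.pyRange 0 (PySem.Chars.len cs - 3) 1).foldl
    (fun best i => pvStep best (PySem.Chars.slice cs (some i) (some (i + 4)))) 3
  if best == 0 then "1900 to 1950"
  else if best == 1 then "1950 to 1970"
  else if best == 2 then "1970 to 1990"
  else "1990 to present"

-- ===== PRECONDITION & SPEC =====
def Spec_get_date_category (date_missing : String) (out : String) : Prop := out = get_date_category_alt date_missing
instance (date_missing : String) (out : String) : Decidable (Spec_get_date_category date_missing out) := by unfold Spec_get_date_category; infer_instance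

-- ===== CLAIM (what is proved, stated in full; the proofs are below) =====
def Claim_equal_get_date_category : Prop := ∀ (date_missing : String), Dom_get_date_category date_missing → Spec_get_date_category date_missing (get_date_category date_missing)

-- ===== LEMMAS AND PROOFS =====

-- the i-th 4-character window
def pvWin (cs : List Char) (i : Nat) : List Char := (cs.drop i).take 4

-- category value of a single window (3 = no category)
def pvG (w : List Char) : Nat := pvStep 3 w

theorem pvStep_le (best : Nat) (w : List Char) (h : best ≤ 3) : pvStep best w ≤ 3 := by
  unfold pvStep; dsimp only; split_ifs <;> omega

theorem pvStep_eq_min (best : Nat) (w : List Char) (h : best ≤ 3) :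
    pvStep best w = min (pvG w) best := by
  unfold pvG pvStep; dsimp only; split_ifs <;> omega

theorem pvFold_le_iff (l : List Nat) (F : Nat → List Char) (b k : Nat) (hb : b ≤ 3) :
    (l.foldl (fun acc i => pvStep acc (F i)) b ≤ k) ↔ b ≤ k ∨ ∃ i ∈ l, pvG (F i) ≤ k := by
  induction l generalizing b with
  | nil => simp
  | cons hd tl ih =>
    rw [List.foldl_cons, ih _ (pvStep_le _ _ hb), pvStep_eq_min _ _ hb]
    simp only [List.mem_cons]
    constructor
    · rintro (hmin | ⟨i, hi, hgi⟩)
      · rcases min_le_iff.mp hmin with h' | h'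
        · exact Or.inr ⟨hd, Or.inl rfl, h'⟩
        · exact Or.inl h'
      · exact Or.inr ⟨i, Or.inr hi, hgi⟩
    · rintro (hb' | ⟨i, rfl | hi, hgi⟩)
      · exact Or.inl (min_le_iff.mpr (Or.inr hb'))
      · exact Or.inl (min_le_iff.mpr (Or.inl hgi))
      · exact Or.inr ⟨i, hi, hgi⟩

theorem pvInfix4 (cs t : List Char) (ht : t.length = 4) :
    t <:+: cs ↔ ∃ i, i < cs.length - 3 ∧ pvWin cs i = t := by
  constructor
  · rintro ⟨s1, s2, h⟩
    refine ⟨s1.length, ?_, ?_⟩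
    · have := congrArg List.length h
      simp [ht] at this
      omega
    · rw [pvWin, ← h]
      rw [List.append_assoc, List.drop_left, ← ht, List.take_left]
  · rintro ⟨i, hi, rfl⟩
    refine ⟨cs.take i, cs.drop (i + 4), ?_⟩
    rw [pvWin, List.append_assoc]
    have h1 : cs.drop (i + 4) = (cs.drop i).drop 4 := by
      rw [List.drop_drop]
      try ring_nf
    rw [h1, List.take_append_drop, List.take_append_drop]

theorem pvWin_len (cs : List Char) (i : Nat) (hi : i < cs.length - 3) :
    (pvWin cs i).length = 4 := by
  simp [pvWin]; omega

theorem pvG_cons (a b c d : Char) :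
    pvG [a, b, c, d] =
      if a = '1' ∧ b = '9' ∧ PySem.Chars.isdigit c = true ∧ PySem.Chars.isdigit d = true then
        (if c ≤ '4' then 0 else if c ≤ '6' then 1 else if c ≤ '8' then 2 else 3)
      else 3 := by
  simp only [pvG, pvStep, PySem.Chars.pyGet?, PySem.List.pyGet?, PySem.List.pyIdx?]
  norm_num
  rw [show [a, b, c, d][Int.toNat 2] = c from rfl, show [a, b, c, d][Int.toNat 3] = d from rfl]
  split_ifs <;> simp_all

theorem pvLen4_cases (w : List Char) (hw : w.length = 4) :
    ∃ a b c d, w = [a, b, c, d] := by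
  rcases w with _ | ⟨a, _ | ⟨b, _ | ⟨c, _ | ⟨d, _ | ⟨e, w⟩⟩⟩⟩⟩ <;> simp_all

theorem pvDigit_mem (c : Char) (h : PySem.Chars.isdigit c = true) :
    c ∈ ['0', '1', '2', '3', '4', '5', '6', '7', '8', '9'] := by
  simp [PySem.Chars.isdigit, Char.le_def] at h
  obtain ⟨h1, h2⟩ := h
  have h1' : 48 ≤ c.val.toNat := UInt32.le_iff_toNat_le.mp h1
  have h2' : c.val.toNat ≤ 57 := UInt32.le_iff_toNat_le.mp h2
  have hd : c.val.toNat = 48 ∨ c.val.toNat = 49 ∨ c.val.toNat = 50 ∨ c.val.toNat = 51 ∨ c.val.toNat = 52 ∨ c.val.toNat = 53 ∨ c.val.toNat = 54 ∨ c.val.toNat = 55 ∨ c.val.toNat = 56 ∨ c.val.toNat = 57 := by omega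
  rcases hd with h | h | h | h | h | h | h | h | h | h
  · have hc : c = '0' := Char.ext (UInt32.toNat_inj.mp (h.trans (by decide)))
    subst hc; decide
  · have hc : c = '1' := Char.ext (UInt32.toNat_inj.mp (h.trans (by decide)))
    subst hc; decide
  · have hc : c = '2' := Char.ext (UInt32.toNat_inj.mp (h.trans (by decide)))
    subst hc; decide
  · have hc : c = '3' := Char.ext (UInt32.toNat_inj.mp (h.trans (by decide)))
    subst hc; decide
  · have hc : c = '4' := Char.ext (UInt32.toNat_inj.mp (h.trans (by decide)))
    subst hc; decide
  · have hc : c = '5' := Char.ext (UInt32.toNat_inj.mp (h.trans (by decide)))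
    subst hc; decide
  · have hc : c = '6' := Char.ext (UInt32.toNat_inj.mp (h.trans (by decide)))
    subst hc; decide
  · have hc : c = '7' := Char.ext (UInt32.toNat_inj.mp (h.trans (by decide)))
    subst hc; decide
  · have hc : c = '8' := Char.ext (UInt32.toNat_inj.mp (h.trans (by decide)))
    subst hc; decide
  · have hc : c = '9' := Char.ext (UInt32.toNat_inj.mp (h.trans (by decide)))
    subst hc; decide

theorem pvMap0 : pvYears0.map String.toList = [['1', '9', '0', '0'], ['1', '9', '0', '1'], ['1', '9', '0', '2'], ['1', '9', '0', '3'], ['1', '9', '0', '4'], ['1', '9', '0', '5'], ['1', '9', '0', '6'], ['1', '9', '0', '7'], ['1', '9', '0', '8'], ['1', '9', '0', '9'], ['1', '9', '1', '0'], ['1', '9', '1', '1'], ['1', '9', '1', '2'], ['1', '9', '1', '3'], ['1', '9', '1', '4'], ['1', '9', '1', '5'], ['1', '9', '1', '6'], ['1', '9', '1', '7'], ['1', '9', '1', '8'], ['1', '9', '1', '9'], ['1', '9', '2', '0'], ['1', '9', '2', '1'], ['1', '9', '2', '2'], ['1', '9', '2', '3'], ['1', '9', '2', '4'], ['1', '9',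 '2', '5'], ['1', '9', '2', '6'], ['1', '9', '2', '7'], ['1', '9', '2', '8'], ['1', '9', '2', '9'], ['1', '9', '3', '0'], ['1', '9', '3', '1'], ['1', '9', '3', '2'], ['1', '9', '3', '3'], ['1', '9', '3', '4'], ['1', '9', '3', '5'], ['1', '9', '3', '6'], ['1', '9', '3', '7'], ['1', '9', '3', '8'], ['1', '9', '3', '9'], ['1', '9', '4', '0'], ['1', '9', '4', '1'], ['1', '9', '4', '2'], ['1', '9', '4', '3'], ['1', '9', '4', '4'], ['1', '9', '4', '5'], ['1', '9', '4', '6'], ['1', '9', '4', '7'], ['1', '9', '4', '8'], ['1', '9', '4', '9']] := by decide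
theorem pvMap1 : pvYears1.map String.toList = [['1', '9', '5', '0'], ['1', '9', '5', '1'], ['1', '9', '5', '2'], ['1', '9', '5', '3'], ['1', '9', '5', '4'], ['1', '9', '5', '5'], ['1', '9', '5', '6'], ['1', '9', '5', '7'], ['1', '9', '5', '8'], ['1', '9', '5', '9'], ['1', '9', '6', '0'], ['1', '9', '6', '1'], ['1', '9', '6', '2'], ['1', '9', '6', '3'], ['1', '9', '6', '4'], ['1', '9', '6', '5'], ['1', '9', '6', '6'], ['1', '9', '6', '7'], ['1', '9', '6', '8'], ['1', '9', '6', '9']] := by decide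
theorem pvMap2 : pvYears2.map String.toList = [['1', '9', '7', '0'], ['1', '9', '7', '1'], ['1', '9', '7', '2'], ['1', '9', '7', '3'], ['1', '9', '7', '4'], ['1', '9', '7', '5'], ['1', '9', '7', '6'], ['1', '9', '7', '7'], ['1', '9', '7', '8'], ['1', '9', '7', '9'], ['1', '9', '8', '0'], ['1', '9', '8', '1'], ['1', '9', '8', '2'], ['1', '9', '8', '3'], ['1', '9', '8', '4'], ['1', '9', '8', '5'], ['1', '9', '8', '6'], ['1', '9', '8', '7'], ['1', '9', '8', '8'], ['1', '9', '8', '9']] := by decide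

theorem pvP0 (w : List Char) (hw : w.length = 4) :
    (∃ y ∈ pvYears0, y.toList = w) ↔ pvG w = 0 := by
  obtain ⟨a, b, c, d, rfl⟩ := pvLen4_cases w hw
  rw [← List.mem_map, pvMap0, pvG_cons]
  constructor
  · intro hmem
    simp only [List.mem_cons, List.cons.injEq, List.not_mem_nil, or_false, and_true] at hmem
    rcases hmem with h | h | h | h | h | h | h | h | h | h | h | h | h | h | h | h | h | h | h | h | h | h | h | h | h | h | h | h | h | h | h | h | h | h | h | h | h | h | h | h | h | h | h | h | h | h | h | h | h | h <;>
      · obtain ⟨rfl, rfl, rfl, rfl⟩ := h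
        decide
  · intro h
    split_ifs at h with hp h4 h6 h8
    all_goals try simp at h
    obtain ⟨rfl, rfl, hc, hd⟩ := hp
    have hcm := pvDigit_mem c hc
    have hdm := pvDigit_mem d hd
    fin_cases hcm <;> first
      | exact absurd h4 (by decide)
      | (fin_cases hdm <;> decide)

theorem pvP1 (w : List Char) (hw : w.length = 4) :
    (∃ y ∈ pvYears1, y.toList = w) ↔ pvG w = 1 := by
  obtain ⟨a, b, c, d, rfl⟩ := pvLen4_cases w hw
  rw [← List.mem_map, pvMap1, pvG_cons]
  constructor
  · intro hmem
    simp only [List.mem_cons, List.cons.injEq, List.not_mem_nil, or_false, and_true] at hmem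
    rcases hmem with h | h | h | h | h | h | h | h | h | h | h | h | h | h | h | h | h | h | h | h <;>
      · obtain ⟨rfl, rfl, rfl, rfl⟩ := h
        decide
  · intro h
    split_ifs at h with hp h4 h6 h8
    all_goals try simp at h
    obtain ⟨rfl, rfl, hc, hd⟩ := hp
    have hcm := pvDigit_mem c hc
    have hdm := pvDigit_mem d hd
    fin_cases hcm <;> first
      | exact absurd (by decide) h4
      | exact absurd h6 (by decide)
      | (fin_cases hdm <;> decide)

theorem pvP2 (w : List Char) (hw : w.length = 4) :
    (∃ y ∈ pvYears2, y.toList = w) ↔ pvG w = 2 := by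
  obtain ⟨a, b, c, d, rfl⟩ := pvLen4_cases w hw
  rw [← List.mem_map, pvMap2, pvG_cons]
  constructor
  · intro hmem
    simp only [List.mem_cons, List.cons.injEq, List.not_mem_nil, or_false, and_true] at hmem
    rcases hmem with h | h | h | h | h | h | h | h | h | h | h | h | h | h | h | h | h | h | h | h <;>
      · obtain ⟨rfl, rfl, rfl, rfl⟩ := h
        decide
  · intro h
    split_ifs at h with hp h4 h6 h8
    all_goals try simp at h
    obtain ⟨rfl, rfl, hc, hd⟩ := hp
    have hcm := pvDigit_mem c hc
    have hdm := pvDigit_mem d hd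
    fin_cases hcm <;> first
      | exact absurd (by decide) h6
      | exact absurd h8 (by decide)
      | (fin_cases hdm <;> decide)

theorem pvAny_iff (ys : List String) (s : String) (h4 : ∀ y ∈ ys, y.toList.length = 4) :
    (ys.any fun y => PySem.Str.isIn y s) = true ↔
      ∃ i, i < s.toList.length - 3 ∧ ∃ y ∈ ys, y.toList = pvWin s.toList i := by
  rw [List.any_eq_true]
  constructor
  · rintro ⟨y, hy, hin⟩
    obtain ⟨i, hi, hwin⟩ := (pvInfix4 s.toList y.toList (h4 y hy)).mp
      ((PySem.Str.isIn_iff_infix y s).mp hin)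
    exact ⟨i, hi, y, hy, hwin.symm⟩
  · rintro ⟨i, hi, y, hy, hw⟩
    exact ⟨y, hy, (PySem.Str.isIn_iff_infix y s).mpr
      ((pvInfix4 s.toList y.toList (h4 y hy)).mpr ⟨i, hi, hw.symm⟩)⟩

theorem pvSlice_win (cs : List Char) (i : Nat) :
    PySem.Chars.slice cs (some ((0 : Int) + (i : Int))) (some ((0 : Int) + (i : Int) + 4)) = pvWin cs i := by
  have h4 : ((i : Int) + 4) = ((i : Int) + ((4 : Nat) : Int)) := by norm_num
  rw [zero_add, h4]
  simp only [pvWin, PySem.Chars.slice]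
  exact PySem.List.slice_natCast_add cs i 4

theorem pvFoldB_eq (cs : List Char) :
    (PySem.List.pyRange 0 (PySem.Chars.len cs - 3) 1).foldl
        (fun best i => pvStep best (PySem.Chars.slice cs (some i) (some (i + 4)))) 3
      = (List.range (cs.length - 3)).foldl (fun acc i => pvStep acc (pvWin cs i)) 3 := by
  rw [PySem.List.pyRange_one, List.foldl_map]
  have hn : ((PySem.Chars.len cs - 3) - 0).toNat = cs.length - 3 := by
    simp [PySem.Chars.len]
    omega
  rw [hn]
  apply List.foldl_ext
  intro acc i _
  rw [pvSlice_win]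

theorem pvMain (s : String) : get_date_category s = get_date_category_alt s := by
  have hy0 : ∀ y ∈ pvYears0, y.toList.length = 4 := by decide
  have hy1 : ∀ y ∈ pvYears1, y.toList.length = 4 := by decide
  have hy2 : ∀ y ∈ pvYears2, y.toList.length = 4 := by decide
  have hA0 : (pvYears0.any fun y => PySem.Str.isIn y s) = true ↔
      ∃ i, i < s.toList.length - 3 ∧ pvG (pvWin s.toList i) = 0 := by
    rw [pvAny_iff _ _ hy0]
    exact exists_congr fun i => and_congr_right fun hi => pvP0 _ (pvWin_len _ _ hi)
  have hA1 : (pvYears1.any fun y => PySem.Str.isIn y s) = true ↔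
      ∃ i, i < s.toList.length - 3 ∧ pvG (pvWin s.toList i) = 1 := by
    rw [pvAny_iff _ _ hy1]
    exact exists_congr fun i => and_congr_right fun hi => pvP1 _ (pvWin_len _ _ hi)
  have hA2 : (pvYears2.any fun y => PySem.Str.isIn y s) = true ↔
      ∃ i, i < s.toList.length - 3 ∧ pvG (pvWin s.toList i) = 2 := by
    rw [pvAny_iff _ _ hy2]
    exact exists_congr fun i => and_congr_right fun hi => pvP2 _ (pvWin_len _ _ hi)
  have hBle : ∀ k, ((List.range (s.toList.length - 3)).foldl
      (fun acc i => pvStep acc (pvWin s.toList i)) 3 ≤ k) ↔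
      3 ≤ k ∨ ∃ i, i < s.toList.length - 3 ∧ pvG (pvWin s.toList i) ≤ k := by
    intro k
    rw [pvFold_le_iff _ _ _ _ (le_refl 3)]
    simp [List.mem_range]
  set B := (List.range (s.toList.length - 3)).foldl
      (fun acc i => pvStep acc (pvWin s.toList i)) 3 with hBdef
  unfold get_date_category get_date_category_alt
  dsimp only
  rw [pvFoldB_eq, ← hBdef]
  by_cases h0 : ∃ i, i < s.toList.length - 3 ∧ pvG (pvWin s.toList i) = 0
  · rw [if_pos (hA0.mpr h0)]
    have hb : B ≤ 0 := (hBle 0).mpr (Or.inr (h0.imp fun i ⟨hi, hg⟩ => ⟨hi, by omega⟩))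
    have hB0 : B = 0 := by omega
    rw [hB0]
    simp
  · rw [if_neg (fun hc => h0 (hA0.mp hc))]
    have hnb0 : ¬ B ≤ 0 := fun hb => by
      rcases (hBle 0).mp hb with h | ⟨i, hi, hg⟩
      · omega
      · exact h0 ⟨i, hi, by omega⟩
    by_cases h1 : ∃ i, i < s.toList.length - 3 ∧ pvG (pvWin s.toList i) = 1
    · rw [if_pos (hA1.mpr h1)]
      have hb : B ≤ 1 := (hBle 1).mpr (Or.inr (h1.imp fun i ⟨hi, hg⟩ => ⟨hi, by omega⟩))
      have hB1 : B = 1 := by omega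
      rw [hB1]
      simp
    · rw [if_neg (fun hc => h1 (hA1.mp hc))]
      have hnb1 : ¬ B ≤ 1 := fun hb => by
        rcases (hBle 1).mp hb with h | ⟨i, hi, hg⟩
        · omega
        · rcases Nat.lt_or_ge (pvG (pvWin s.toList i)) 1 with hlt | hge
          · exact h0 ⟨i, hi, by omega⟩
          · exact h1 ⟨i, hi, by omega⟩
      by_cases h2 : ∃ i, i < s.toList.length - 3 ∧ pvG (pvWin s.toList i) = 2
      · rw [if_pos (hA2.mpr h2)]
        have hb : B ≤ 2 := (hBle 2).mpr (Or.inr (h2.imp fun i ⟨hi, hg⟩ => ⟨hi, by omega⟩))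
        have hB2 : B = 2 := by omega
        rw [hB2]
        simp
      · rw [if_neg (fun hc => h2 (hA2.mp hc))]
        have hnb2 : ¬ B ≤ 2 := fun hb => by
          rcases (hBle 2).mp hb with h | ⟨i, hi, hg⟩
          · omega
          · rcases Nat.lt_or_ge (pvG (pvWin s.toList i)) 2 with hlt | hge
            · rcases Nat.lt_or_ge (pvG (pvWin s.toList i)) 1 with hlt1 | hge1
              · exact h0 ⟨i, hi, by omega⟩
              · exact h1 ⟨i, hi, by omega⟩
            · exact h2 ⟨i, hi, by omega⟩
        have hb3 : B ≤ 3 := (hBle 3).mpr (Or.inl (le_refl 3))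
        have hB3 : B = 3 := by omega
        rw [hB3]
        simp

-- ===== VERDICT (by name: the statement is the Claim_ definition above) =====
theorem get_date_category_spec : Claim_equal_get_date_category := by
  intro s _
  unfold Spec_get_date_category
  exact pvMain s
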